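-- pv_equiv track=rewrite | github.com/KaiDalgleish/foobar | access.py | answer
-- ===== SOURCE A (Python) =====
-- def answer(x):
--     """
--     Given list of codes consisting of chars a-z, determine number of unique codes.
--     Codes can be read forward or backward, so abc == cba.
--     """
--
--     unique_codes = set()
--
--     for code in x:
--         if code in unique_codes or code[::-1] in unique_codes:
--             continue
--         else:
--             unique_codes.add(code)
--
--     return len(unique_codes)
-- ===== SOURCE B (Python) =====
-- def answer(x):
--     """
--     Given list of codes consisting of chars a-z, determine number of unique codes.
--     Codes can be read forward or backward, so abc == cba.
--     """
--     return len({min(code, code[::-1]) for code in x})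
-- ===== Notes on version B (the rewrite author's own statement) =====
-- stated objective: idiomatic
-- what changed: Replaces the two-way membership test with early-continue (set of first-seen orientations) by canonicalization: each code is mapped to min(code, reversed code) and the answer is the size of the set of canonical forms, built in one branch-free comprehension.
import Mathlib
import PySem

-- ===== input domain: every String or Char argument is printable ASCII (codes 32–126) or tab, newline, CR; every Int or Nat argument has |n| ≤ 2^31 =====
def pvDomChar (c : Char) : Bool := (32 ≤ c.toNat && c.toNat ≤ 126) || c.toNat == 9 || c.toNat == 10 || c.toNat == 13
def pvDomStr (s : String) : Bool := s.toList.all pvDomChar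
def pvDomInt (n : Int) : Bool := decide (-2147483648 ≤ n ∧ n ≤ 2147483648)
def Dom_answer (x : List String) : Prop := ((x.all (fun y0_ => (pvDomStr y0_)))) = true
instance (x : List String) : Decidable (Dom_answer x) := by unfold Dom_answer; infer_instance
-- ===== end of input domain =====

-- B replaces A's two-way membership test (is the code or its reverse already seen?)
-- with canonicalization: collect min(code, reversed code) into a set and return its size.
-- Objective: idiomatic (branch-free one-liner); same asymptotic cost.

-- ===== PORT A =====
-- code[::-1] — exact per PySem.Str.slice?_none_none_neg_one (the slice never fails, getD never fires)
def pvRev (code : String) : String := (PySem.Str.slice? code none none (-1)).getD ""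

def answer (x : List String) : Int :=
  PySem.Set.len
    (x.foldl (fun unique_codes code =>
      if PySem.Set.contains unique_codes code || PySem.Set.contains unique_codes (pvRev code) then
        unique_codes
      else
        PySem.Set.add unique_codes code)
      PySem.Set.empty)

-- ===== PORT B =====
-- min(code, code[::-1]) — Python's min of two strs; str '<'/'≤' is Lean's order on String
def pvCanon (code : String) : String := min code (pvRev code)

def answer_alt (x : List String) : Int :=
  PySem.Set.len (PySem.Set.ofList (x.map pvCanon))

-- ===== PRECONDITION & SPEC =====
def Spec_answer (x : List String) (out : Int) : Prop := out = answer_alt x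
instance (x : List String) (out : Int) : Decidable (Spec_answer x out) := by unfold Spec_answer; infer_instance

-- ===== CLAIM (what is proved, stated in full; the proofs are below) =====
def Claim_equal_answer : Prop := ∀ (x : List String), Dom_answer x → Spec_answer x (answer x)

-- ===== LEMMAS AND PROOFS =====

theorem pvRev_eq (s : String) : pvRev s = String.ofList s.toList.reverse := by
  simp [pvRev, PySem.Str.slice?_none_none_neg_one]

theorem pvRev_rev (s : String) : pvRev (pvRev s) = s := by
  simp [pvRev_eq]

theorem pvCanon_rev (s : String) : pvCanon (pvRev s) = pvCanon s := by
  simp [pvCanon, pvRev_rev, min_comm]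

-- canonical forms coincide exactly on a reversal class
theorem pvCanon_eq_cases {a b : String} (h : pvCanon a = pvCanon b) :
    b = a ∨ b = pvRev a := by
  rcases min_choice a (pvRev a) with h1 | h1 <;>
  rcases min_choice b (pvRev b) with h2 | h2 <;>
  rw [pvCanon] at h <;> rw [pvCanon] at h <;> rw [h1, h2] at h
  · exact Or.inl h.symm
  · right; rw [h, pvRev_rev]
  · exact Or.inr h.symm
  · left
    have h' := congrArg pvRev h
    rw [pvRev_rev, pvRev_rev] at h'
    exact h'.symm

theorem mem_map_canon_iff (seen : List String) (code : String) :
    pvCanon code ∈ seen.map pvCanon ↔ (code ∈ seen ∨ pvRev code ∈ seen) := by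
  constructor
  · intro h
    rcases List.mem_map.mp h with ⟨s, hs, hcs⟩
    rcases pvCanon_eq_cases hcs with h' | h'
    · exact Or.inl (h' ▸ hs)
    · right; rw [h', pvRev_rev]; exact hs
  · rintro (h | h)
    · exact List.mem_map.mpr ⟨code, h, rfl⟩
    · exact List.mem_map.mpr ⟨pvRev code, h, pvCanon_rev code⟩

theorem contains_eq_true {s : PySem.Set String} {c : String} (h : c ∈ s) :
    PySem.Set.contains s c = true := by
  simp [PySem.Set.contains, h]

theorem contains_eq_false {s : PySem.Set String} {c : String} (h : c ∉ s) :
    PySem.Set.contains s c = false := by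
  simp [PySem.Set.contains, h]

theorem add_of_mem {s : PySem.Set String} {c : String} (h : c ∈ s) :
    PySem.Set.add s c = s := by
  simp [PySem.Set.add, PySem.Set.contains, h]

theorem add_of_not_mem {s : PySem.Set String} {c : String} (h : c ∉ s) :
    PySem.Set.add s c = s ++ [c] := by
  simp [PySem.Set.add, PySem.Set.contains, h]

-- one step of A's loop, mirrored through the canonical map
theorem step_eq (seen : PySem.Set String) (code : String) :
    PySem.Set.add (seen.map pvCanon) (pvCanon code) =
      (if PySem.Set.contains seen code || PySem.Set.contains seen (pvRev code) then
        seen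
      else PySem.Set.add seen code).map pvCanon := by
  by_cases h : code ∈ seen ∨ pvRev code ∈ seen
  · have hmem : pvCanon code ∈ seen.map pvCanon := (mem_map_canon_iff seen code).mpr h
    have hc : (PySem.Set.contains seen code || PySem.Set.contains seen (pvRev code)) = true := by
      rcases h with h | h
      · rw [contains_eq_true h, Bool.true_or]
      · rw [contains_eq_true h, Bool.or_true]
    rw [hc, if_pos rfl, add_of_mem hmem]
  · rw [not_or] at h
    have hc : (PySem.Set.contains seen code || PySem.Set.contains seen (pvRev code)) = false := by
      rw [contains_eq_false h.1, contains_eq_false h.2]; rfl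
    have hnot : pvCanon code ∉ seen.map pvCanon := fun hm =>
      ((mem_map_canon_iff seen code).mp hm).elim h.1 h.2
    rw [hc, if_neg (by simp), add_of_not_mem hnot, add_of_not_mem h.1, List.map_append,
      List.map_cons, List.map_nil]

-- the whole loop: B's state is the canonical image of A's state
theorem loop_eq (x : List String) (seen : PySem.Set String) :
    (x.map pvCanon).foldl PySem.Set.add (seen.map pvCanon) =
      (x.foldl (fun unique_codes code =>
        if PySem.Set.contains unique_codes code ||
           PySem.Set.contains unique_codes (pvRev code) then
          unique_codes
        else PySem.Set.add unique_codes code) seen).map pvCanon := by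
  induction x generalizing seen with
  | nil => rfl
  | cons c t ih =>
    simp only [List.map_cons, List.foldl_cons]
    rw [step_eq seen c]
    exact ih _

-- ===== VERDICT (by name: the statement is the Claim_ definition above) =====
theorem answer_spec : Claim_equal_answer := by
  intro x _
  unfold Spec_answer answer answer_alt
  rw [PySem.Set.ofList_eq_foldl]
  have h := loop_eq x PySem.Set.empty
  simp only [PySem.Set.empty, List.map_nil] at h
  unfold PySem.Set.len
  simp only [PySem.Set.empty]
  rw [h, List.length_map]
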